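-- pv_equiv track=rewrite | github.com/pipipopocoli/motherload_projet | projet_autre/lec_odds_cli.py | strength_of_victory
-- ===== SOURCE A (Python) =====
-- from typing import Dict, List, Tuple, Optional, Iterable, Set
--
-- TEAMS = [
--     "Fnatic",
--     "G2 Esports",
--     "GIANTX",
--     "Karmine Corp",
--     "Karmine Corp Blue",
--     "Los Ratones",
--     "Movistar KOI",
--     "Natus Vincere",
--     "Shifters",
--     "SK Gaming",
--     "Team Heretics",
--     "Team Vitality",
-- ]
--
-- def strength_of_victory(team: str, winner_by_pair: Dict[Tuple[str, str], str], final_wins: Dict[str, int]) -> int: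
--     """SoV: sum(final wins of opponents you beat)."""
--     total = 0
--     for opp in TEAMS:
--         if opp == team:
--             continue
--         k = tuple(sorted((team, opp)))
--         w = winner_by_pair.get(k)
--         if w == team:
--             total += final_wins[opp]
--     return total
-- ===== SOURCE B (Python) =====
-- from typing import Dict, Tuple
--
-- TEAMS = [
--     "Fnatic",
--     "G2 Esports",
--     "GIANTX",
--     "Karmine Corp",
--     "Karmine Corp Blue",
--     "Los Ratones",
--     "Movistar KOI",
--     "Natus Vincere",
--     "Shifters",
--     "SK Gaming",
--     "Team Heretics",
--     "Team Vitality",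
-- ]
--
-- def strength_of_victory(team: str, winner_by_pair: Dict[Tuple[str, str], str], final_wins: Dict[str, int]) -> int:
--     """SoV: sum(final wins of opponents you beat), walking the match dictionary once."""
--     total = 0
--     for (a, b), w in winner_by_pair.items():
--         if w != team:
--             continue
--         opp = b if a == team else a
--         total += final_wins.get(opp, 0)
--     return total
-- ===== Notes on version B (the rewrite author's own statement) =====
-- stated objective: idiomatic
-- what changed: B walks winner_by_pair.items() once, summing final_wins.get(opp, 0) over entries team won, instead of probing the dictionary once per team in TEAMS; Pre_ requires distinct pair keys and that every entry team won is a well-formed match record (canonical sorted key, opponent a known team listed in final_wins) - outside that A either raises KeyError or silently skips a win entry that violates the map's tuple(sorted(...)) key invariant, a malformed-input corner where either value is defensible.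
-- outside the precondition, e.g. on strength_of_victory('Fnatic', {('Fnatic', 'Zed'): 'Fnatic'}, {'Zed': 5}): A returns 0, B returns 5; on strength_of_victory('Fnatic', {('G2 Esports', 'Fnatic'): 'Fnatic'}, {'G2 Esports': 3}): A returns 0, B returns 3
import Mathlib
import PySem

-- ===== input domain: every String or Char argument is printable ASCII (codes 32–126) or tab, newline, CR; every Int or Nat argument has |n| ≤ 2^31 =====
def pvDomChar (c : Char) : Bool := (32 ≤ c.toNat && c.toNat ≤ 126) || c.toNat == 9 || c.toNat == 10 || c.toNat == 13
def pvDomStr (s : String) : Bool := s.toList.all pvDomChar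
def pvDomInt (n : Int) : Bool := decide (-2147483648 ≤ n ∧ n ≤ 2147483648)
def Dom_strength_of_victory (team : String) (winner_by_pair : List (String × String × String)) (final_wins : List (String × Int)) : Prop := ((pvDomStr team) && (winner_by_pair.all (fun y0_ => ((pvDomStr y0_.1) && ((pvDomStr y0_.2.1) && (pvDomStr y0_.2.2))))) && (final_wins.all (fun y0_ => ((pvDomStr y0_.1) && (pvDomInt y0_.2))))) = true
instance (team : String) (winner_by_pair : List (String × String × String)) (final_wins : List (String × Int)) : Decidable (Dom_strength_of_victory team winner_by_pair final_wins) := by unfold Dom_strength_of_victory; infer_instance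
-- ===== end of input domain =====

-- B walks the match list once, summing final wins of opponents in entries team won, instead of probing it once per team in TEAMS (idiomatic traversal, equal return value on Pre_).


-- ===== PORT A =====
def pvTEAMS : List String :=
  ["Fnatic", "G2 Esports", "GIANTX", "Karmine Corp", "Karmine Corp Blue",
   "Los Ratones", "Movistar KOI", "Natus Vincere", "Shifters", "SK Gaming",
   "Team Heretics", "Team Vitality"]

-- Python's '<' on strings: lexicographic by code point, strict prefix smaller. Hand-rolled over toList because
-- Lean's own String.lt instance is not kernel-reducible; exact on all inputs.
def pvCharsLt : List Char → List Char → Bool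
  | [], [] => false
  | [], _ :: _ => true
  | _ :: _, [] => false
  | c :: cs, d :: ds =>
    if c.toNat < d.toNat then true
    else if d.toNat < c.toNat then false
    else pvCharsLt cs ds

def pvStrLt (s t : String) : Bool := pvCharsLt s.toList t.toList

-- tuple(sorted((team, opp))): Python's stable sort of a two-element tuple, unrolled (swap iff opp < team)
def pvKey (team opp : String) : String × String :=
  if pvStrLt opp team then (opp, team) else (team, opp)

-- winner_by_pair.get(k): dict lookup on the flattened association list
def pvWinner (wbp : List (String × String × String)) (k : String × String) : Option String :=
  (PySem.Dict.mk (wbp.map (fun e => ((e.1, e.2.1), e.2.2)))).get? k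

-- A's final_wins[opp]: where get? is none Python raises KeyError (excluded by Pre_); the port returns the junk
-- default 0 there. B's final_wins.get(opp, 0) is EXACTLY this function.
def pvFw (fw : List (String × Int)) (opp : String) : Int :=
  ((PySem.Dict.mk fw).get? opp).getD 0

def strength_of_victory (team : String) (winner_by_pair : List (String × String × String)) (final_wins : List (String × Int)) : Int :=
  pvTEAMS.foldl (fun total opp =>
    if opp = team then total
    else
      match pvWinner winner_by_pair (pvKey team opp) with
      | some w => if w = team then total + pvFw final_wins opp else total
      | none => total) 0

-- ===== PORT B =====
def strength_of_victory_alt (team : String) (winner_by_pair : List (String × String × String)) (final_wins : List (String × Int)) : Int :=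
  winner_by_pair.foldl (fun total e =>
    if e.2.2 ≠ team then total
    else total + pvFw final_wins (if e.1 = team then e.2.1 else e.1)) 0

-- ===== PRECONDITION & SPEC =====
-- Pre_ excludes (i) association lists with duplicate pair keys, which no Python dict input can have, and
-- (ii) inputs where some entry team won is not a well-formed match record (canonical sorted key, opponent a
-- known team listed in final_wins): on those malformed inputs A either raises KeyError or silently skips a
-- win entry that violates the map's tuple(sorted(...)) key invariant, a corner where either value is defensible.
def Pre_strength_of_victory (team : String) (winner_by_pair : List (String × String × String)) (final_wins : List (String × Int)) : Prop :=
  (winner_by_pair.map (fun e => (e.1, e.2.1))).Nodup ∧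
  ∀ e ∈ winner_by_pair, e.2.2 = team →
    (if e.1 = team then e.2.1 else e.1) ∈ pvTEAMS ∧
    (if e.1 = team then e.2.1 else e.1) ≠ team ∧
    (e.1, e.2.1) = pvKey team (if e.1 = team then e.2.1 else e.1) ∧
    (if e.1 = team then e.2.1 else e.1) ∈ final_wins.map Prod.fst
instance (team : String) (winner_by_pair : List (String × String × String)) (final_wins : List (String × Int)) : Decidable (Pre_strength_of_victory team winner_by_pair final_wins) := by unfold Pre_strength_of_victory; infer_instance

def pvWitness_strength_of_victory : String × (List (String × String × String)) × (List (String × Int)) :=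
  ("Fnatic", [("Fnatic", "G2 Esports", "Fnatic")], [("G2 Esports", 3)])

def Spec_strength_of_victory (team : String) (winner_by_pair : List (String × String × String)) (final_wins : List (String × Int)) (out : Int) : Prop := out = strength_of_victory_alt team winner_by_pair final_wins
instance (team : String) (winner_by_pair : List (String × String × String)) (final_wins : List (String × Int)) (out : Int) : Decidable (Spec_strength_of_victory team winner_by_pair final_wins out) := by unfold Spec_strength_of_victory; infer_instance

-- ===== CLAIM (what is proved, stated in full; the proofs are below) =====
def Claim_equal_strength_of_victory : Prop := ∀ (team : String) (winner_by_pair : List (String × String × String)) (final_wins : List (String × Int)), Dom_strength_of_victory team winner_by_pair final_wins → Pre_strength_of_victory team winner_by_pair final_wins → Spec_strength_of_victory team winner_by_pair final_wins (strength_of_victory team winner_by_pair final_wins)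

-- ===== LEMMAS AND PROOFS =====

-- per-team contribution of A, per-entry contribution of B, and an intermediate per-entry form whose filters
-- mirror A's probing universe (used only inside the proof)
def pvContribA (team : String) (wbp : List (String × String × String)) (fw : List (String × Int)) (opp : String) : Int :=
  if opp = team then 0
  else
    match pvWinner wbp (pvKey team opp) with
    | some w => if w = team then pvFw fw opp else 0
    | none => 0

def pvContribM (ts : List String) (team : String) (fw : List (String × Int)) (e : String × String × String) : Int :=
  if e.2.2 ≠ team then 0
  else
    let opp := if e.1 = team then e.2.1 else e.1
    if opp = team ∨ ¬ opp ∈ ts then 0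
    else if (e.1, e.2.1) ≠ pvKey team opp then 0
    else pvFw fw opp

def pvContribB (team : String) (fw : List (String × Int)) (e : String × String × String) : Int :=
  if e.2.2 ≠ team then 0 else pvFw fw (if e.1 = team then e.2.1 else e.1)

theorem pvWinner_nil (k : String × String) : pvWinner [] k = none := rfl

theorem pvWinner_cons (a b w : String) (rest : List (String × String × String)) (k : String × String) :
    pvWinner ((a, b, w) :: rest) k = if (a, b) = k then some w else pvWinner rest k := by
  simp [pvWinner, PySem.Dict.get?_mk_cons]

theorem pvWinner_eq_none_of_not_mem (rest : List (String × String × String)) (k : String × String)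
    (h : k ∉ rest.map (fun e => (e.1, e.2.1))) : pvWinner rest k = none := by
  rw [pvWinner, PySem.Dict.get?_eq_none_iff_not_mem_keys]
  simpa [PySem.Dict.keys] using h

-- pvKey team t = (a, b) with t ≠ team forces (if a = team then b else a) = t
theorem pvKey_opp (team t a b : String) (ht : t ≠ team) (h : pvKey team t = (a, b)) :
    (if a = team then b else a) = t := by
  unfold pvKey at h
  split at h <;> (injection h with h1 h2; subst h1; subst h2)
  · rw [if_neg ht]
  · simp

theorem strength_of_victory_eq_sum (team : String) (wbp : List (String × String × String)) (fw : List (String × Int)) :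
    strength_of_victory team wbp fw = (pvTEAMS.map (pvContribA team wbp fw)).sum := by
  unfold strength_of_victory
  rw [PySem.List.foldl_congr_mem (g := fun total opp => total + pvContribA team wbp fw opp)]
  · rw [PySem.List.foldl_add]; simp
  · intro acc x _
    unfold pvContribA
    rcases h : pvWinner wbp (pvKey team x) with _ | w
    · split_ifs <;> simp
    · by_cases hx : x = team
      · simp [hx]
      · by_cases hw : w = team <;> simp [hx, hw]

theorem strength_of_victory_alt_eq_sum (team : String) (wbp : List (String × String × String)) (fw : List (String × Int)) :
    strength_of_victory_alt team wbp fw = (wbp.map (pvContribB team fw)).sum := by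
  unfold strength_of_victory_alt
  rw [PySem.List.foldl_congr_mem (g := fun total e => total + pvContribB team fw e)]
  · rw [PySem.List.foldl_add]; simp
  · intro acc e _
    unfold pvContribB
    split_ifs <;> simp

theorem sum_contribA_cons (team a b w : String) (rest : List (String × String × String)) (fw : List (String × Int))
    (hk : (a, b) ∉ rest.map (fun e => (e.1, e.2.1))) :
    ∀ ts : List String, ts.Nodup →
      (ts.map (pvContribA team ((a, b, w) :: rest) fw)).sum
        = pvContribM ts team fw (a, b, w) + (ts.map (pvContribA team rest fw)).sum := by
  intro ts
  induction ts with
  | nil =>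
    intro _
    simp [pvContribM]
  | cons t ts' ih =>
    intro hnd
    rcases List.nodup_cons.mp hnd with ⟨htmem, hnd'⟩
    by_cases hopp : t ≠ team ∧ pvKey team t = (a, b)
    · -- t is the unique opponent this entry can talk about
      rcases hopp with ⟨ht, hkey⟩
      have hoppt : (if a = team then b else a) = t := pvKey_opp team t a b ht hkey
      have hA1 : pvContribA team ((a, b, w) :: rest) fw t = if w = team then pvFw fw t else 0 := by
        unfold pvContribA
        rw [pvWinner_cons, hkey]
        simp [ht]
      have hA2 : pvContribA team rest fw t = 0 := by
        unfold pvContribA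
        rw [← hkey] at hk
        rw [pvWinner_eq_none_of_not_mem rest _ hk]
        simp [ht]
      have hB1 : pvContribM (t :: ts') team fw (a, b, w) = if w = team then pvFw fw t else 0 := by
        unfold pvContribM
        simp [hoppt, ht, hkey.symm]
      have hB2 : pvContribM ts' team fw (a, b, w) = 0 := by
        unfold pvContribM
        simp [hoppt, htmem]
      have := ih hnd'
      rw [hB2] at this
      simp only [List.map_cons, List.sum_cons, hA1, hA2, hB1, this]
    · -- this entry is not about t
      have hA : pvContribA team ((a, b, w) :: rest) fw t = pvContribA team rest fw t := by
        unfold pvContribA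
        by_cases ht : t = team
        · simp [ht]
        · rw [pvWinner_cons]
          have hne : ¬ (a, b) = pvKey team t := by
            intro h'
            exact hopp ⟨ht, h'.symm⟩
          simp [ht, hne]
      have hB : pvContribM (t :: ts') team fw (a, b, w) = pvContribM ts' team fw (a, b, w) := by
        unfold pvContribM
        by_cases hw : w = team
        · by_cases hoppt : (if a = team then b else a) = t
          · by_cases ht : t = team
            · simp [hoppt, ht]
            · have hne : ¬ (a, b) = pvKey team t := fun h' => hopp ⟨ht, h'.symm⟩
              simp [hoppt, ht, hne, hw, htmem]
          · by_cases hmem : (if a = team then b else a) ∈ ts'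
            · simp [hoppt, hmem]
            · simp [hoppt, hmem]
        · simp [hw]
      have := ih hnd'
      simp only [List.map_cons, List.sum_cons, hA, hB, this]
      ring

theorem sum_eq_sumM (team : String) (fw : List (String × Int)) :
    ∀ wbp : List (String × String × String), (wbp.map (fun e => (e.1, e.2.1))).Nodup →
    ∀ ts : List String, ts.Nodup →
      (ts.map (pvContribA team wbp fw)).sum = (wbp.map (pvContribM ts team fw)).sum := by
  intro wbp
  induction wbp with
  | nil =>
    intro _ ts _
    have h0 : List.map (pvContribA team [] fw) ts = List.map (fun _ => (0 : Int)) ts :=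
      List.map_congr_left (fun opp _ => by unfold pvContribA; rw [pvWinner_nil]; simp)
    simp [h0]
  | cons e rest ih =>
    intro hnd ts hts
    obtain ⟨a, b, w⟩ := e
    rcases List.nodup_cons.mp hnd with ⟨hkmem, hnd'⟩
    rw [sum_contribA_cons team a b w rest fw hkmem ts hts, ih hnd' ts hts]
    simp

-- on entries admitted by Pre_'s per-entry condition, the intermediate filtered contribution is B's contribution
theorem contribM_eq_contribB (team : String) (fw : List (String × Int)) (e : String × String × String)
    (hc : e.2.2 = team →
      (if e.1 = team then e.2.1 else e.1) ∈ pvTEAMS ∧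
      (if e.1 = team then e.2.1 else e.1) ≠ team ∧
      (e.1, e.2.1) = pvKey team (if e.1 = team then e.2.1 else e.1) ∧
      (if e.1 = team then e.2.1 else e.1) ∈ fw.map Prod.fst) :
    pvContribM pvTEAMS team fw e = pvContribB team fw e := by
  unfold pvContribM pvContribB
  by_cases hw : e.2.2 = team
  · rcases hc hw with ⟨hmem, hne, hkey, _⟩
    simp [hw, hmem, hne, hkey.symm]
  · simp [hw]

-- ===== VERDICT (by name: the statement is the Claim_ definition above) =====
theorem strength_of_victory_spec : Claim_equal_strength_of_victory := by
  intro team wbp fw _ hpre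
  unfold Spec_strength_of_victory
  rw [strength_of_victory_eq_sum, strength_of_victory_alt_eq_sum]
  rw [sum_eq_sumM team fw wbp hpre.1 pvTEAMS (by decide)]
  exact congrArg List.sum
    (List.map_congr_left (fun e he => contribM_eq_contribB team fw e (hpre.2 e he)))
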